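-- pv_equiv track=rewrite | github.com/tarunganesh2004/GFG | 2025/May/28th_may.py | find_rectangle_with_corners
-- ===== SOURCE A (Python) =====
-- def find_rectangle_with_corners(mat):
--     m,n= len(mat), len(mat[0])
--     for i in range(m):
--         row=mat[i]
--         for j in range(i+1,m):
--             count=0
--             r2= mat[j]
--             for k in range(n):
--                 if row[k]==1 and r2[k]==1:
--                     count+=1
--             if count>=2:
--                 return True
--     return False
-- ===== SOURCE B (Python) =====
-- def find_rectangle_with_corners(mat):
--     n = len(mat[0])
--     seen = set()
--     for row in mat:
--         ones = [k for k in range(n) if row[k] == 1]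
--         for x in range(len(ones)):
--             for y in range(x + 1, len(ones)):
--                 p = (ones[x], ones[y])
--                 if p in seen:
--                     return True
--                 seen.add(p)
--     return False
-- ===== Notes on version B (the rewrite author's own statement) =====
-- stated objective: faster
-- what changed: A compares every pair of rows counting common 1-columns; B makes a single pass over the rows, recording each row's ordered pairs of 1-columns in a set and returning True at the first repeated pair (at most C(n,2)+1 pair insertions can ever happen before a duplicate, so the pair work is bounded independently of the row count).
-- outside the precondition, e.g. on find_rectangle_with_corners([[0], []]): A returns False, B raises IndexError; on find_rectangle_with_corners([[1, 1], [1, 1], [1]]): A returns True, B returns True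
import Mathlib
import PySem

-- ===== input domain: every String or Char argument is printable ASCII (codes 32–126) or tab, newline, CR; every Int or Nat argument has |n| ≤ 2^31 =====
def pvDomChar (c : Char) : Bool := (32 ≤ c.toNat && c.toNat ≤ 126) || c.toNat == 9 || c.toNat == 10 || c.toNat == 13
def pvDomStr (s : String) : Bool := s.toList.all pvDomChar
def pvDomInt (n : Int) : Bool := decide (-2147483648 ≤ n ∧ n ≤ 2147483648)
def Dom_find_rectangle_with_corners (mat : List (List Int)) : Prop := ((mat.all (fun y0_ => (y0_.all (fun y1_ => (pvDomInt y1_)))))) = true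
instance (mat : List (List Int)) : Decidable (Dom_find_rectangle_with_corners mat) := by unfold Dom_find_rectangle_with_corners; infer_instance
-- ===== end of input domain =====

-- B replaces A's all-pairs row comparison by a single pass over the rows that records each row's
-- column pairs of 1s in a set and reports a rectangle at the first repeated pair ("alternative"/faster
-- in the row count; equivalence of return values is proved below).

-- ===== PORT A =====
-- row[k] for 0 ≤ k < n ≤ len(row) (guaranteed by Pre_) is List.getD; the index loops become a fold
-- over List.range / structural recursion over the remaining rows; `return True` = early exit.
def pvACount (row r2 : List Int) (n : Nat) : Int :=
  (List.range n).foldl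
    (fun count k => if row.getD k 0 == 1 && r2.getD k 0 == 1 then count + 1 else count) 0

def pvARec (n : Nat) : List (List Int) → Bool
  | [] => false
  | row :: rest =>
    if rest.any (fun r2 => decide (2 ≤ pvACount row r2 n)) then true
    else pvARec n rest

def find_rectangle_with_corners (mat : List (List Int)) : Bool :=
  pvARec (mat.headD []).length mat

-- ===== PORT B =====
-- ones = [k for k in range(n) if row[k] == 1]
def pvBOnes (n : Nat) (row : List Int) : List Nat :=
  (List.range n).filter (fun k => row.getD k 0 == 1)

-- inner loop `for y in range(x+1, len(ones))`: pairs (a, b) for b after a, early exit on a seen pair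
def pvBAddPairs (a : Nat) : List Nat → PySem.Set (Nat × Nat) → Bool × PySem.Set (Nat × Nat)
  | [], seen => (false, seen)
  | b :: rest, seen =>
    if (a, b) ∈ seen then (true, seen)      -- `p in seen` (PySem.Set membership)
    else pvBAddPairs a rest (seen.add (a, b))

-- outer loop `for x in range(len(ones))`
def pvBRowPairs : List Nat → PySem.Set (Nat × Nat) → Bool × PySem.Set (Nat × Nat)
  | [], seen => (false, seen)
  | a :: rest, seen =>
    let r := pvBAddPairs a rest seen
    if r.1 then (true, r.2) else pvBRowPairs rest r.2

-- `for row in mat`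
def pvBLoop (n : Nat) : List (List Int) → PySem.Set (Nat × Nat) → Bool
  | [], _ => false
  | row :: rest, seen =>
    let r := pvBRowPairs (pvBOnes n row) seen
    if r.1 then true else pvBLoop n rest r.2

def find_rectangle_with_corners_alt (mat : List (List Int)) : Bool :=
  pvBLoop (mat.headD []).length mat PySem.Set.empty

-- ===== PRECONDITION & SPEC =====
-- Pre_ excludes the empty matrix (mat[0] raises IndexError) and ragged matrices with a row shorter
-- than the first row: whether A raises IndexError there or still returns a value is an accident of
-- its scan order and of `and` short-circuiting, and B's natural single pass itself raises on such rows.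
def Pre_find_rectangle_with_corners (mat : List (List Int)) : Prop :=
  mat ≠ [] ∧ ∀ row ∈ mat, (mat.headD []).length ≤ row.length
instance (mat : List (List Int)) : Decidable (Pre_find_rectangle_with_corners mat) := by
  unfold Pre_find_rectangle_with_corners; infer_instance

def pvWitness_find_rectangle_with_corners : List (List Int) := [[1, 0], [0, 1]]

def Spec_find_rectangle_with_corners (mat : List (List Int)) (out : Bool) : Prop := out = find_rectangle_with_corners_alt mat
instance (mat : List (List Int)) (out : Bool) : Decidable (Spec_find_rectangle_with_corners mat out) := by unfold Spec_find_rectangle_with_corners; infer_instance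

-- ===== CLAIM (what is proved, stated in full; the proofs are below) =====
def Claim_equal_find_rectangle_with_corners : Prop := ∀ (mat : List (List Int)), Dom_find_rectangle_with_corners mat → Pre_find_rectangle_with_corners mat → Spec_find_rectangle_with_corners mat (find_rectangle_with_corners mat)

-- ===== LEMMAS AND PROOFS =====

-- the ordered pairs Source B's two index loops enumerate from a row's `ones` list
def pvPairs : List Nat → List (Nat × Nat)
  | [] => []
  | a :: rest => rest.map (fun b => (a, b)) ++ pvPairs rest

lemma mem_pvPairs {l : List Nat} (h : l.Pairwise (· < ·)) (a b : Nat) :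
    (a, b) ∈ pvPairs l ↔ a ∈ l ∧ b ∈ l ∧ a < b := by
  induction l with
  | nil => simp [pvPairs]
  | cons x rest ih =>
    obtain ⟨hx, hrest⟩ := List.pairwise_cons.mp h
    simp only [pvPairs, List.mem_append, List.mem_map, List.mem_cons]
    constructor
    · rintro (⟨b', hb', heq⟩ | hp)
      · cases heq; exact ⟨Or.inl rfl, Or.inr hb', hx _ hb'⟩
      · obtain ⟨ha, hb, hab⟩ := (ih hrest).mp hp
        exact ⟨Or.inr ha, Or.inr hb, hab⟩
    · rintro ⟨(rfl | ha), (rfl | hb), hab⟩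
      · exact absurd hab (lt_irrefl _)
      · exact Or.inl ⟨b, hb, rfl⟩
      · exact absurd (lt_trans (hx _ ha) hab) (lt_irrefl _)
      · exact Or.inr ((ih hrest).mpr ⟨ha, hb, hab⟩)

lemma mem_pvPairs' {l : List Nat} (h : l.Pairwise (· < ·)) (p : Nat × Nat) :
    p ∈ pvPairs l ↔ p.1 ∈ l ∧ p.2 ∈ l ∧ p.1 < p.2 := by
  cases p; exact mem_pvPairs h _ _

lemma pvBAddPairs_false_mem {a : Nat} {rest : List Nat} {seen : PySem.Set (Nat × Nat)}
    (hf : (pvBAddPairs a rest seen).1 = false) (p : Nat × Nat) :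
    p ∈ (pvBAddPairs a rest seen).2 ↔ p ∈ seen ∨ ∃ b ∈ rest, p = (a, b) := by
  induction rest generalizing seen with
  | nil => simp [pvBAddPairs]
  | cons b rest ih =>
    by_cases hm : (a, b) ∈ seen
    · simp only [pvBAddPairs, if_pos hm] at hf; simp at hf
    · simp only [pvBAddPairs, if_neg hm] at hf ⊢
      rw [ih hf]
      simp [PySem.Set.mem_add]
      tauto

lemma pvBAddPairs_true_iff {a : Nat} {rest : List Nat} {seen : PySem.Set (Nat × Nat)}
    (hnd : rest.Nodup) :
    (pvBAddPairs a rest seen).1 = true ↔ ∃ b ∈ rest, (a, b) ∈ seen := by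
  induction rest generalizing seen with
  | nil => simp [pvBAddPairs]
  | cons b rest ih =>
    obtain ⟨hb, hnd'⟩ := List.nodup_cons.mp hnd
    by_cases hm : (a, b) ∈ seen
    · simp only [pvBAddPairs, if_pos hm]
      exact iff_of_true (by simp) ⟨b, List.mem_cons_self, hm⟩
    · simp only [pvBAddPairs, if_neg hm]
      rw [ih hnd']
      constructor
      · rintro ⟨b', hb', hmem⟩
        rcases (PySem.Set.mem_add ..).mp hmem with hmem | heq
        · exact ⟨b', List.mem_cons_of_mem _ hb', hmem⟩
        · injection heq with h1 h2; subst h2; exact absurd hb' hb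
      · rintro ⟨b', hb', hmem⟩
        rcases List.mem_cons.mp hb' with rfl | hb'
        · exact absurd hmem hm
        · exact ⟨b', hb', (PySem.Set.mem_add ..).mpr (Or.inl hmem)⟩

lemma nodup_of_pairwise_lt {l : List Nat} (h : l.Pairwise (· < ·)) : l.Nodup :=
  h.imp (fun hlt => Nat.ne_of_lt hlt)

lemma pvBRowPairs_true_iff {ones : List Nat} {seen : PySem.Set (Nat × Nat)}
    (h : ones.Pairwise (· < ·)) :
    (pvBRowPairs ones seen).1 = true ↔ ∃ p ∈ pvPairs ones, p ∈ seen := by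
  induction ones generalizing seen with
  | nil => simp [pvBRowPairs, pvPairs]
  | cons a rest ih =>
    obtain ⟨ha, hrest⟩ := List.pairwise_cons.mp h
    have hnd : rest.Nodup := nodup_of_pairwise_lt hrest
    simp only [pvBRowPairs]
    by_cases h1 : (pvBAddPairs a rest seen).1 = true
    · rw [if_pos h1]
      obtain ⟨b, hb, hmem⟩ := (pvBAddPairs_true_iff hnd).mp h1
      refine iff_of_true rfl ⟨(a, b), ?_, hmem⟩
      simp only [pvPairs, List.mem_append, List.mem_map]
      exact Or.inl ⟨b, hb, rfl⟩
    · have h1' : (pvBAddPairs a rest seen).1 = false := by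
        cases hx : (pvBAddPairs a rest seen).1 <;> simp_all
      rw [if_neg (by simp [h1'])]
      rw [ih hrest]
      have hno : ¬∃ b ∈ rest, (a, b) ∈ seen := fun hex =>
        h1 ((pvBAddPairs_true_iff hnd).mpr hex)
      constructor
      · rintro ⟨p, hp, hmem⟩
        rw [pvBAddPairs_false_mem h1' p] at hmem
        rcases hmem with hmem | ⟨b, hb, rfl⟩
        · exact ⟨p, by simp [pvPairs, hp], hmem⟩
        · exact absurd ((mem_pvPairs' hrest _).mp hp).1
            (fun hmem' => lt_irrefl a (ha _ hmem'))
      · rintro ⟨p, hp, hmem⟩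
        simp only [pvPairs, List.mem_append, List.mem_map] at hp
        rcases hp with ⟨b, hb, rfl⟩ | hp
        · exact absurd ⟨b, hb, hmem⟩ hno
        · exact ⟨p, hp, (pvBAddPairs_false_mem h1' p).mpr (Or.inl hmem)⟩

lemma pvBRowPairs_false_mem {ones : List Nat} {seen : PySem.Set (Nat × Nat)}
    (h : ones.Pairwise (· < ·)) (hf : (pvBRowPairs ones seen).1 = false) (p : Nat × Nat) :
    p ∈ (pvBRowPairs ones seen).2 ↔ p ∈ seen ∨ p ∈ pvPairs ones := by
  induction ones generalizing seen with
  | nil => simp [pvBRowPairs, pvPairs]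
  | cons a rest ih =>
    obtain ⟨ha, hrest⟩ := List.pairwise_cons.mp h
    simp only [pvBRowPairs] at hf ⊢
    by_cases h1 : (pvBAddPairs a rest seen).1 = true
    · rw [if_pos h1] at hf; exact absurd hf (by simp)
    · have h1' : (pvBAddPairs a rest seen).1 = false := by
        cases hx : (pvBAddPairs a rest seen).1 <;> simp_all
      rw [if_neg (by simp [h1'])] at hf ⊢
      rw [ih hrest hf, pvBAddPairs_false_mem h1' p]
      simp only [pvPairs, List.mem_append, List.mem_map]
      constructor
      · rintro ((hs | ⟨b, hb, rfl⟩) | hp)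
        · exact Or.inl hs
        · exact Or.inr (Or.inl ⟨b, hb, rfl⟩)
        · exact Or.inr (Or.inr hp)
      · rintro (hs | (⟨b, hb, heq⟩ | hp))
        · exact Or.inl (Or.inl hs)
        · exact Or.inl (Or.inr ⟨b, hb, heq.symm ▸ rfl⟩)
        · exact Or.inr hp

-- the abstract "two rows share an ordered column pair" predicate both ports decide
def pvShares (n : Nat) (r1 r2 : List Int) : Prop :=
  ∃ p, p ∈ pvPairs (pvBOnes n r1) ∧ p ∈ pvPairs (pvBOnes n r2)

def pvTwo (n : Nat) : List (List Int) → Prop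
  | [] => False
  | r :: rs => (∃ r2 ∈ rs, pvShares n r r2) ∨ pvTwo n rs

lemma pvBOnes_sorted (n : Nat) (row : List Int) : (pvBOnes n row).Pairwise (· < ·) :=
  List.pairwise_lt_range.filter _

lemma pvBLoop_iff (n : Nat) (rows : List (List Int)) (seen : PySem.Set (Nat × Nat))
    (P : Nat × Nat → Prop) (hs : ∀ p, p ∈ seen ↔ P p) :
    pvBLoop n rows seen = true ↔
      (∃ r ∈ rows, ∃ p ∈ pvPairs (pvBOnes n r), P p) ∨ pvTwo n rows := by
  induction rows generalizing seen P with
  | nil => simp [pvBLoop, pvTwo]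
  | cons r rs ih =>
    have hsort := pvBOnes_sorted n r
    simp only [pvBLoop]
    by_cases h1 : (pvBRowPairs (pvBOnes n r) seen).1 = true
    · rw [if_pos h1]
      obtain ⟨p, hp, hmem⟩ := (pvBRowPairs_true_iff hsort).mp h1
      exact iff_of_true rfl (Or.inl ⟨r, List.mem_cons_self, p, hp, (hs p).mp hmem⟩)
    · have h1' : (pvBRowPairs (pvBOnes n r) seen).1 = false := by
        cases hx : (pvBRowPairs (pvBOnes n r) seen).1 <;> simp_all
      rw [if_neg (by simp [h1'])]
      have hno : ¬∃ p ∈ pvPairs (pvBOnes n r), P p := by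
        rintro ⟨p, hp, hP⟩
        exact h1 ((pvBRowPairs_true_iff hsort).mpr ⟨p, hp, (hs p).mpr hP⟩)
      rw [ih _ (fun p => P p ∨ p ∈ pvPairs (pvBOnes n r))
            (fun p => (pvBRowPairs_false_mem hsort h1' p).trans (or_congr (hs p) Iff.rfl))]
      simp only [pvTwo, List.mem_cons]
      constructor
      · rintro (⟨r', hr', p, hp, hPp⟩ | htwo)
        · rcases hPp with hP | hpr
          · exact Or.inl ⟨r', Or.inr hr', p, hp, hP⟩
          · exact Or.inr (Or.inl ⟨r', hr', p, hpr, hp⟩)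
        · exact Or.inr (Or.inr htwo)
      · rintro (⟨r', hr', p, hp, hP⟩ | ⟨r2, hr2, p, hp1, hp2⟩ | htwo)
        · rcases hr' with rfl | hr'
          · exact absurd ⟨p, hp, hP⟩ hno
          · exact Or.inl ⟨r', hr', p, hp, Or.inl hP⟩
        · exact Or.inl ⟨r2, hr2, p, hp2, Or.inr hp1⟩
        · exact Or.inr htwo

-- A-side characterisation
lemma pvACount_eq (row r2 : List Int) (n : Nat) :
    pvACount row r2 n =
      (((List.range n).filter
        (fun k => row.getD k 0 == 1 && r2.getD k 0 == 1)).length : Int) := by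
  unfold pvACount
  rw [PySem.List.foldl_count_if]
  simp [List.countP_eq_length_filter]

lemma two_le_length_iff {l : List Nat} (h : l.Pairwise (· < ·)) :
    2 ≤ l.length ↔ ∃ a b, a ∈ l ∧ b ∈ l ∧ a < b := by
  match l, h with
  | [], _ => simp
  | [x], _ => simp
  | a :: b :: t, h =>
    have hab : a < b := (List.pairwise_cons.mp h).1 b List.mem_cons_self
    simp only [List.length_cons]
    exact iff_of_true (by omega)
      ⟨a, b, List.mem_cons_self, List.mem_cons_of_mem _ List.mem_cons_self, hab⟩

lemma pvShares_iff (n : Nat) (r1 r2 : List Int) :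
    pvShares n r1 r2 ↔ 2 ≤ pvACount r1 r2 n := by
  have hcom : ((List.range n).filter
      (fun k => r1.getD k 0 == 1 && r2.getD k 0 == 1)).Pairwise (· < ·) :=
    List.pairwise_lt_range.filter _
  have hmem : ∀ k : Nat, k ∈ (List.range n).filter
      (fun k => r1.getD k 0 == 1 && r2.getD k 0 == 1) ↔
      k ∈ pvBOnes n r1 ∧ k ∈ pvBOnes n r2 := by
    intro k; simp [pvBOnes, List.mem_filter]; tauto
  rw [pvACount_eq]
  have : (2 : Int) ≤ (((List.range n).filter
      (fun k => r1.getD k 0 == 1 && r2.getD k 0 == 1)).length : Int) ↔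
      2 ≤ ((List.range n).filter
      (fun k => r1.getD k 0 == 1 && r2.getD k 0 == 1)).length := by omega
  rw [this, two_le_length_iff hcom]
  unfold pvShares
  constructor
  · rintro ⟨⟨a, b⟩, hp1, hp2⟩
    obtain ⟨ha1, hb1, hab⟩ := (mem_pvPairs (pvBOnes_sorted n r1) a b).mp hp1
    obtain ⟨ha2, hb2, -⟩ := (mem_pvPairs (pvBOnes_sorted n r2) a b).mp hp2
    exact ⟨a, b, (hmem a).mpr ⟨ha1, ha2⟩, (hmem b).mpr ⟨hb1, hb2⟩, hab⟩
  · rintro ⟨a, b, ha, hb, hab⟩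
    obtain ⟨ha1, ha2⟩ := (hmem a).mp ha
    obtain ⟨hb1, hb2⟩ := (hmem b).mp hb
    exact ⟨(a, b), (mem_pvPairs (pvBOnes_sorted n r1) a b).mpr ⟨ha1, hb1, hab⟩,
      (mem_pvPairs (pvBOnes_sorted n r2) a b).mpr ⟨ha2, hb2, hab⟩⟩

lemma pvARec_iff (n : Nat) (rows : List (List Int)) :
    pvARec n rows = true ↔ pvTwo n rows := by
  induction rows with
  | nil => simp [pvARec, pvTwo]
  | cons r rs ih =>
    simp only [pvARec, pvTwo]
    by_cases hany : rs.any (fun r2 => decide (2 ≤ pvACount r r2 n)) = true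
    · rw [if_pos hany]
      rw [List.any_eq_true] at hany
      obtain ⟨r2, hr2, hc⟩ := hany
      exact iff_of_true rfl (Or.inl ⟨r2, hr2, (pvShares_iff n r r2).mpr (of_decide_eq_true hc)⟩)
    · rw [if_neg hany, ih]
      have hno : ¬∃ r2 ∈ rs, pvShares n r r2 := by
        rintro ⟨r2, hr2, hsh⟩
        exact hany (List.any_eq_true.mpr ⟨r2, hr2,
          decide_eq_true ((pvShares_iff n r r2).mp hsh)⟩)
      exact ⟨fun h => Or.inr h, fun h => h.resolve_left hno⟩

-- ===== VERDICT (by name: the statement is the Claim_ definition above) =====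
theorem find_rectangle_with_corners_spec : Claim_equal_find_rectangle_with_corners := by
  intro mat _ _
  unfold Spec_find_rectangle_with_corners
  unfold find_rectangle_with_corners find_rectangle_with_corners_alt
  rw [Bool.eq_iff_iff, pvARec_iff]
  rw [pvBLoop_iff _ _ _ (fun _ => False) (by simp [PySem.Set.empty])]
  simp
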